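-- pv_equiv track=rewrite | github.com/AofKraj11nashi/Software-Development-Activities | Week 8 - Activity/main.py | buildStationStats
-- ===== SOURCE A (Python) =====
-- def buildStationStats(bookingData):
--     """
--     Build a dictionary storing station activity counts.
--
--     Parameters
--     ----------
--     bookingData : list of tuples
--         Each tuple: (customerId, stationName, dayType, durationHours)
--
--     Returns
--     -------
--     dict :
--         stationCounts : dict mapping stationName (str) to number of bookings (int)
--         stationCustomerSet : dict mapping stationName (str) to set of customers (set of str)
--     """
--     stationCounts = {}
--     stationCustomerSet = {}
--
--     for booking in bookingData:
--         customerId, stationName, dayType, durationHours = booking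
--
--
--         currentCount = stationCounts.get(stationName, 0)
--         stationCounts[stationName] = currentCount + 1
--
--         # Use setdefault for stationCustomerSet
--         customerSetForStation = stationCustomerSet.setdefault(stationName, set())
--         customerSetForStation.add(customerId)
--
--
--     return stationCounts, stationCustomerSet
-- ===== SOURCE B (Python) =====
-- def buildStationStats(bookingData):
--     # Phase 1: group bookings by station (first-seen insertion order).
--     groups = {}
--     for booking in bookingData:
--         groups.setdefault(booking[1], []).append(booking)
--     # Phase 2: reduce each group independently.
--     stationCounts = {station: len(group) for station, group in groups.items()}
--     stationCustomerSet = {station: {b[0] for b in group} for station, group in groups.items()}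
--     return stationCounts, stationCustomerSet
-- ===== Notes on version B (the rewrite author's own statement) =====
-- stated objective: alternative
-- what changed: A maintains both aggregates (counts and customer sets) inline in one loop; B first groups bookings into a station->list dict and then derives each aggregate by separate dict comprehensions (len of group, set of customer ids).
import Mathlib
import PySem

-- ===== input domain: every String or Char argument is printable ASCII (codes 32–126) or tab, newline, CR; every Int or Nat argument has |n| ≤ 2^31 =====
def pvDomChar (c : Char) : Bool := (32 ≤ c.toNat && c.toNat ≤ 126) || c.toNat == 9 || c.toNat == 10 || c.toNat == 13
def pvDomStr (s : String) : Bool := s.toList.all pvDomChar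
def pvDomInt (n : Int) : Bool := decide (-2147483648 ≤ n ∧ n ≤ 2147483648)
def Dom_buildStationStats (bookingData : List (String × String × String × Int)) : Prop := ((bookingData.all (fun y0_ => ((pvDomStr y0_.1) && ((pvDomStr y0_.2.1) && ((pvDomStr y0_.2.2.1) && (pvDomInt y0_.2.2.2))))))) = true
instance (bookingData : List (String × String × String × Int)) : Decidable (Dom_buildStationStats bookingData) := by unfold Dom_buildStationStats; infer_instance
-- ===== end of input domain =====

-- B replaces A's inline dual-aggregate loop by a group-then-reduce decomposition (same cost, different structure).


-- ===== PORT A =====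
-- one loop iteration of A: bump the count, setdefault the customer set and add the customer
def pvStepA (st : PySem.Dict String Int × PySem.Dict String (PySem.Set String))
    (booking : String × String × String × Int) :
    PySem.Dict String Int × PySem.Dict String (PySem.Set String) :=
  let customerId := booking.1
  let stationName := booking.2.1
  let currentCount := st.1.getD stationName 0
  let stationCounts := st.1.insert stationName (currentCount + 1)
  -- setdefault returns the stored set; the in-place .add then writes it back at the same key
  let d1 := st.2.setdefault stationName PySem.Set.empty
  let customerSetForStation := d1.getD stationName PySem.Set.empty
  let stationCustomerSet := d1.insert stationName (PySem.Set.add customerSetForStation customerId)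
  (stationCounts, stationCustomerSet)

def buildStationStats (bookingData : List (String × String × String × Int)) : (List (String × Int)) × (List (String × List String)) :=
  let r := bookingData.foldl pvStepA (PySem.Dict.mk [], PySem.Dict.mk [])
  (r.1.items, r.2.items)

-- ===== PORT B =====
-- phase 1 iteration of B: groups.setdefault(booking[1], []).append(booking)
def pvStepB (g : PySem.Dict String (List (String × String × String × Int)))
    (booking : String × String × String × Int) :
    PySem.Dict String (List (String × String × String × Int)) :=
  let g1 := g.setdefault booking.2.1 []
  g1.insert booking.2.1 (g1.getD booking.2.1 [] ++ [booking])

def buildStationStats_alt (bookingData : List (String × String × String × Int)) : (List (String × Int)) × (List (String × List String)) :=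
  let groups := bookingData.foldl pvStepB (PySem.Dict.mk [])
  (groups.items.map (fun p => (p.1, (p.2.length : Int))),
   groups.items.map (fun p => (p.1, PySem.Set.ofList (p.2.map Prod.fst))))

-- ===== PRECONDITION & SPEC =====
def Spec_buildStationStats (bookingData : List (String × String × String × Int)) (out : (List (String × Int)) × (List (String × List String))) : Prop := out = buildStationStats_alt bookingData
instance (bookingData : List (String × String × String × Int)) (out : (List (String × Int)) × (List (String × List String))) : Decidable (Spec_buildStationStats bookingData out) := by unfold Spec_buildStationStats; infer_instance

-- ===== CLAIM (what is proved, stated in full; the proofs are below) =====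
def Claim_equal_buildStationStats : Prop := ∀ (bookingData : List (String × String × String × Int)), Dom_buildStationStats bookingData → Spec_buildStationStats bookingData (buildStationStats bookingData)

-- ===== LEMMAS AND PROOFS =====

-- map a function over every value of a dict, keeping keys and order
def pvDmap {ν ω : Type} (f : ν → ω) (d : PySem.Dict String ν) : PySem.Dict String ω :=
  PySem.Dict.mk (d.items.map (fun p => (p.1, f p.2)))

theorem pvNotContains_all {ν : Type} (d : PySem.Dict String ν) (k : String)
    (hc : ¬ d.contains k = true) : ∀ p ∈ d.items, (p.1 == k) = false := by
  intro p hp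
  by_contra hne
  exact hc (List.any_eq_true.mpr ⟨p, hp, by revert hne; cases p.1 == k <;> simp⟩)

theorem pvGet?_dmap {ν ω : Type} (f : ν → ω) (d : PySem.Dict String ν) (k : String) :
    (pvDmap f d).get? k = (d.get? k).map f := by
  obtain ⟨l⟩ := d
  induction l with
  | nil => rfl
  | cons p t ih =>
    simp only [pvDmap, PySem.Dict.get?, List.map_cons, List.find?_cons] at *
    by_cases h : p.1 == k
    · simp [h]
    · simp only [h]; simpa [pvDmap, PySem.Dict.get?] using ih

theorem pvContains_dmap {ν ω : Type} (f : ν → ω) (d : PySem.Dict String ν) (k : String) :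
    (pvDmap f d).contains k = d.contains k := by
  rw [PySem.Dict.contains_eq_isSome_get?, PySem.Dict.contains_eq_isSome_get?, pvGet?_dmap]
  cases d.get? k <;> rfl

theorem pvGetD_dmap {ν ω : Type} (f : ν → ω) (d : PySem.Dict String ν) (k : String)
    (d0 : ν) (w0 : ω) (h : f d0 = w0) :
    (pvDmap f d).getD k w0 = f (d.getD k d0) := by
  simp only [PySem.Dict.getD, pvGet?_dmap]
  cases d.get? k <;> simp [h]

theorem pvDmap_insert {ν ω : Type} (f : ν → ω) (d : PySem.Dict String ν) (k : String) (v : ν) :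
    pvDmap f (d.insert k v) = (pvDmap f d).insert k (f v) := by
  simp only [PySem.Dict.insert, pvContains_dmap]
  by_cases h : d.contains k
  · simp only [h, if_true, pvDmap, List.map_map]
    congr 1
    apply List.map_congr_left
    intro p _
    by_cases hp : p.1 = k <;> simp [hp]
  · simp [h, pvDmap]

theorem pvDmap_setdefault {ν ω : Type} (f : ν → ω) (d : PySem.Dict String ν) (k : String)
    (v : ν) (w : ω) (h : f v = w) :
    pvDmap f (d.setdefault k v) = (pvDmap f d).setdefault k w := by
  simp only [PySem.Dict.setdefault, pvContains_dmap]
  by_cases hc : d.contains k <;> simp [hc, pvDmap, h]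

theorem pvSetdefault_insert {ν : Type} (d : PySem.Dict String ν) (k : String) (v w : ν) :
    (d.setdefault k v).insert k w = d.insert k w := by
  by_cases hc : d.contains k
  · rw [PySem.Dict.setdefault, if_pos hc]
  · have hall := pvNotContains_all d k hc
    have h2 : (PySem.Dict.mk (d.items ++ [(k, v)])).contains k = true := by
      simp [PySem.Dict.contains]
    rw [PySem.Dict.setdefault, if_neg hc]
    simp only [PySem.Dict.insert]
    rw [if_pos h2, if_neg hc]
    congr 1
    rw [PySem.Dict.items, List.map_append]
    have hmap : List.map (fun p : String × ν => if (p.1 == k) = true then (k, w) else p) d.items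
        = List.map id d.items := by
      apply List.map_congr_left
      intro p hp
      simp [hall p hp]
    rw [hmap, List.map_id]
    simp

theorem pvGetD_setdefault_self {ν : Type} (d : PySem.Dict String ν) (k : String) (v : ν) :
    (d.setdefault k v).getD k v = d.getD k v := by
  by_cases hc : d.contains k
  · rw [PySem.Dict.setdefault, if_pos hc]
  · have hall := pvNotContains_all d k hc
    have hnone : List.find? (fun p : String × ν => p.1 == k) d.items = none := by
      rw [List.find?_eq_none]
      intro p hp
      simp [hall p hp]
    rw [PySem.Dict.setdefault, if_neg hc]
    simp only [PySem.Dict.getD, PySem.Dict.get?]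
    rw [List.find?_append, hnone]
    simp

theorem pvOfList_append_singleton {α : Type} [BEq α] (xs : List α) (x : α) :
    PySem.Set.ofList (xs ++ [x]) = PySem.Set.add (PySem.Set.ofList xs) x := by
  rw [PySem.Set.ofList_eq_foldl, PySem.Set.ofList_eq_foldl, List.foldl_append]
  rfl

-- the two value reductions B applies per group
def pvLen (l : List (String × String × String × Int)) : Int := (l.length : Int)
def pvCust (l : List (String × String × String × Int)) : PySem.Set String :=
  PySem.Set.ofList (l.map Prod.fst)

theorem pvStep_eq (g : PySem.Dict String (List (String × String × String × Int)))
    (b : String × String × String × Int) :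
    pvStepA (pvDmap pvLen g, pvDmap pvCust g) b = (pvDmap pvLen (pvStepB g b), pvDmap pvCust (pvStepB g b)) := by
  simp only [pvStepA, pvStepB, Prod.mk.injEq]
  have h1 : (g.setdefault b.2.1 []).getD b.2.1 [] = g.getD b.2.1 [] :=
    pvGetD_setdefault_self g b.2.1 []
  constructor
  · -- counts component
    rw [pvDmap_insert, pvDmap_setdefault pvLen g b.2.1 [] 0 rfl, pvSetdefault_insert]
    congr 1
    rw [h1, pvGetD_dmap pvLen g b.2.1 [] 0 rfl]
    simp [pvLen]
  · -- customer-set component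
    rw [pvDmap_insert, pvDmap_setdefault pvCust g b.2.1 [] PySem.Set.empty rfl,
        pvSetdefault_insert, pvSetdefault_insert]
    congr 1
    rw [pvGetD_setdefault_self (pvDmap pvCust g) b.2.1 PySem.Set.empty,
        pvGetD_dmap pvCust g b.2.1 [] PySem.Set.empty rfl, h1]
    simp only [pvCust, List.map_append, List.map_cons, List.map_nil]
    exact (pvOfList_append_singleton _ _).symm

theorem pvLoop_eq (l : List (String × String × String × Int))
    (g : PySem.Dict String (List (String × String × String × Int))) :
    l.foldl pvStepA (pvDmap pvLen g, pvDmap pvCust g)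
      = (pvDmap pvLen (l.foldl pvStepB g), pvDmap pvCust (l.foldl pvStepB g)) := by
  induction l generalizing g with
  | nil => rfl
  | cons b t ih =>
    simp only [List.foldl_cons]
    rw [pvStep_eq]
    exact ih (pvStepB g b)

-- ===== VERDICT (by name: the statement is the Claim_ definition above) =====
theorem buildStationStats_spec : Claim_equal_buildStationStats := by
  intro bd _
  unfold Spec_buildStationStats buildStationStats buildStationStats_alt
  show (fun r : PySem.Dict String Int × PySem.Dict String (PySem.Set String) =>
      (r.1.items, r.2.items))
      (bd.foldl pvStepA (pvDmap pvLen (PySem.Dict.mk []), pvDmap pvCust (PySem.Dict.mk []))) = _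
  rw [pvLoop_eq]
  simp [pvDmap, pvLen, pvCust]
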